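-- pv_equiv track=rewrite | github.com/BlockySpiderX/Competitive-Programming | Codeforces/Maths/A. Sum of Round Numbers.py | split
-- ===== SOURCE A (Python) =====
-- def split(n):
--     ans = []
--     place = 1
--
--     while n> 0:
--         digit = n%10
--
--         if digit != 0:
--             ans.append(digit* place)
--
--         n//= 10
--         place*=10
--
--     return ans[::-1]
-- ===== SOURCE B (Python) =====
-- def split(n):
--     if n <= 0:
--         return []
--     s = str(n)
--     ans = []
--     for i, ch in enumerate(s):
--         d = int(ch)
--         if d != 0:
--             ans.append(d * 10 ** (len(s) - 1 - i))
--     return ans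
-- ===== Notes on version B (the rewrite author's own statement) =====
-- stated objective: idiomatic
-- what changed: B converts n to its decimal string and emits digit*place contributions left-to-right with explicit powers of ten, instead of A's modulus/floor-division loop that collects places low-to-high and reverses at the end.
import Mathlib
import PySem

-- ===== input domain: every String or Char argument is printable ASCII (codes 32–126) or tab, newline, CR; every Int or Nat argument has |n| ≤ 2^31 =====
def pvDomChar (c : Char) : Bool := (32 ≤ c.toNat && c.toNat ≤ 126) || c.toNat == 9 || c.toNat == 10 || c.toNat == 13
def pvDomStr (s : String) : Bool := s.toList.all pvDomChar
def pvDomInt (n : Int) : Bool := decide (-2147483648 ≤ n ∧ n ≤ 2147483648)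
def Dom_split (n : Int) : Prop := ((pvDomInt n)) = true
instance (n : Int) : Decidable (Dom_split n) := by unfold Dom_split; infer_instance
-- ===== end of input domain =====

-- B re-implements A's %10-//10 digit loop (collected low-to-high, reversed at the end) by walking
-- the decimal string of n left-to-right with explicit powers of ten; same return value everywhere.

-- termination measure fact for the %10-//10 recursions (cited in decreasing_by)
lemma pv_div10_lt (n : Int) (h : 0 < n) : (PySem.Int.floordiv n 10).toNat < n.toNat := by
  rw [PySem.Int.floordiv_eq_ediv_of_pos (by norm_num)]
  have h1 : n / 10 * 10 ≤ n := Int.ediv_mul_le n (by norm_num)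
  have h2 : 0 ≤ n / 10 := Int.ediv_nonneg h.le (by norm_num)
  omega

-- ===== PORT A =====
-- A's while-loop; terminates because n // 10 < n when n > 0
def splitLoop (n place : Int) (ans : List Int) : List Int :=
  if 0 < n then
    let digit := PySem.Int.mod n 10
    splitLoop (PySem.Int.floordiv n 10) (place * 10)
      (if digit ≠ 0 then ans ++ [digit * place] else ans)
  else ans
termination_by n.toNat
decreasing_by
  rename_i h
  exact pv_div10_lt n h

def split (n : Int) : List Int :=
  (PySem.List.slice? (splitLoop n 1 []) none none (-1)).getD []   -- ans[::-1]; step -1 never raises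

-- ===== PORT B =====
-- int(ch) on a single character is PySem.Int.ofChars? [ch] (never none on the digits of str(n));
-- the exponent len(s)-1-i is nonnegative since i < len(s), so .toNat is exact.
def split_alt (n : Int) : List Int :=
  if n ≤ 0 then []
  else
    let s := PySem.Int.toChars n
    (PySem.List.enumerate s 0).foldl
      (fun ans p =>
        let d : Int := (PySem.Int.ofChars? [p.2]).getD 0
        if d ≠ 0 then ans ++ [d * 10 ^ (((s.length : Int) - 1 - p.1).toNat)] else ans)
      []

-- ===== PRECONDITION & SPEC =====
def Spec_split (n : Int) (out : List Int) : Prop := out = split_alt n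
instance (n : Int) (out : List Int) : Decidable (Spec_split n out) := by unfold Spec_split; infer_instance

-- ===== CLAIM (what is proved, stated in full; the proofs are below) =====
def Claim_equal_split : Prop := ∀ (n : Int), Dom_split n → Spec_split n (split n)

-- ===== LEMMAS AND PROOFS =====

def digitVal (c : Char) : Int := (PySem.Int.ofChars? [c]).getD 0
def Rv (n place : Int) : List Int :=
  if 0 < n then
    Rv (PySem.Int.floordiv n 10) (place * 10) ++
      (if PySem.Int.mod n 10 ≠ 0 then [PySem.Int.mod n 10 * place] else [])
  else []
termination_by n.toNat
decreasing_by
  rename_i h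
  exact pv_div10_lt n h


lemma splitLoop_pos (n place : Int) (ans : List Int) (h : 0 < n) :
    splitLoop n place ans = splitLoop (PySem.Int.floordiv n 10) (place * 10)
      (if PySem.Int.mod n 10 ≠ 0 then ans ++ [PySem.Int.mod n 10 * place] else ans) := by
  rw [splitLoop, if_pos h]

lemma splitLoop_nonpos (n place : Int) (ans : List Int) (h : ¬ 0 < n) :
    splitLoop n place ans = ans := by
  rw [splitLoop, if_neg h]

lemma Rv_pos (n place : Int) (h : 0 < n) :
    Rv n place = Rv (PySem.Int.floordiv n 10) (place * 10) ++
      (if PySem.Int.mod n 10 ≠ 0 then [PySem.Int.mod n 10 * place] else []) := by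
  rw [Rv, if_pos h]

lemma Rv_nonpos (n place : Int) (h : ¬ 0 < n) : Rv n place = [] := by
  rw [Rv, if_neg h]

lemma splitLoop_acc (N : Nat) : ∀ (n place : Int) (ans : List Int), n.toNat ≤ N →
    splitLoop n place ans = ans ++ splitLoop n place [] := by
  induction N with
  | zero =>
    intro n place ans h
    rw [splitLoop_nonpos _ _ _ (by omega), splitLoop_nonpos _ _ _ (by omega)]
    simp
  | succ N ih =>
    intro n place ans h
    by_cases h0 : 0 < n
    · rw [splitLoop_pos _ _ _ h0, splitLoop_pos _ _ [] h0]
      have hle : (PySem.Int.floordiv n 10).toNat ≤ N := by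
        have := pv_div10_lt n h0; omega
      rw [ih _ _ _ hle, ih _ _ (if PySem.Int.mod n 10 ≠ 0 then [] ++ [PySem.Int.mod n 10 * place] else []) hle]
      split_ifs <;> simp
    · rw [splitLoop_nonpos _ _ _ h0, splitLoop_nonpos _ _ _ h0]; simp

lemma splitLoop_reverse (n place : Int) : (splitLoop n place []).reverse = Rv n place := by
  induction n, place using Rv.induct with
  | case1 n place h ih =>
    rw [splitLoop_pos _ _ _ h, Rv_pos _ _ h]
    rw [splitLoop_acc (PySem.Int.floordiv n 10).toNat _ _ _ le_rfl]
    rw [List.reverse_append, ih]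
    split_ifs <;> simp
  | case2 n place h =>
    rw [splitLoop_nonpos _ _ _ h, Rv_nonpos _ _ h]
    rfl

lemma Rv_scale (n place : Int) : Rv n (place * 10) = (Rv n place).map (· * 10) := by
  induction n, place using Rv.induct with
  | case1 n place h ih =>
    rw [Rv_pos n (place * 10) h, Rv_pos n place h, List.map_append, ih]
    congr 1
    split_ifs <;> simp [mul_assoc]
  | case2 n place h =>
    rw [Rv_nonpos _ _ h, Rv_nonpos _ _ h]
    rfl

lemma toDigitsCore_acc (f : Nat) : ∀ (n : Nat) (l : List Char),
    Nat.toDigitsCore 10 f n l = Nat.toDigitsCore 10 f n [] ++ l := by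
  induction f with
  | zero => intro n l; simp [Nat.toDigitsCore]
  | succ f ih =>
    intro n l
    simp only [Nat.toDigitsCore]
    by_cases h : n / 10 = 0
    · simp [h]
    · simp only [h, if_false]
      rw [ih (n / 10) [(n % 10).digitChar], ih (n / 10) ((n % 10).digitChar :: l)]
      simp

lemma toDigitsCore_fuel (n : Nat) : ∀ (f f' : Nat) (l : List Char), n < f → n < f' →
    Nat.toDigitsCore 10 f n l = Nat.toDigitsCore 10 f' n l := by
  induction n using Nat.strong_induction_on with
  | _ n ih =>
    intro f f' l hf hf'
    match f, f' with
    | g + 1, g' + 1 =>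
      simp only [Nat.toDigitsCore]
      by_cases h : n / 10 = 0
      · simp [h]
      · simp only [h, if_false]
        have hlt : n / 10 < n := Nat.div_lt_self (by omega) (by norm_num)
        exact ih (n / 10) hlt g g' _ (by omega) (by omega)

lemma toDigits_lt (m : Nat) (h : m < 10) : Nat.toDigits 10 m = [Nat.digitChar m] := by
  simp [Nat.toDigits, Nat.toDigitsCore, Nat.div_eq_of_lt h, Nat.mod_eq_of_lt h]

lemma toDigitsCore_step (f n : Nat) (l : List Char) (h : ¬ n / 10 = 0) :
    Nat.toDigitsCore 10 (f + 1) n l = Nat.toDigitsCore 10 f (n / 10) ((n % 10).digitChar :: l) := by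
  conv_lhs => rw [Nat.toDigitsCore]
  simp [h]

lemma toDigits_ge (m : Nat) (h : 10 ≤ m) :
    Nat.toDigits 10 m = Nat.toDigits 10 (m / 10) ++ [Nat.digitChar (m % 10)] := by
  have hne : ¬ m / 10 = 0 := by
    have := Nat.div_le_div_right (c := 10) h; simp at this; omega
  have hlt : m / 10 < m := Nat.div_lt_self (by omega) (by norm_num)
  unfold Nat.toDigits
  rw [toDigitsCore_step m m [] hne, toDigitsCore_acc]
  congr 1
  exact toDigitsCore_fuel (m / 10) _ _ [] (by omega) (by omega)

lemma digitVal_digitChar (d : Nat) (h : d < 10) : digitVal (Nat.digitChar d) = (d : Int) := by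
  interval_cases d <;> decide

def goB : List Char → List Int
  | [] => []
  | c :: t => (goB t).map (· * 10) ++ (if digitVal c ≠ 0 then [digitVal c] else [])
def contrib (L : Int) (p : Int × Char) : List Int :=
  if digitVal p.2 ≠ 0 then [digitVal p.2 * 10 ^ ((L - 1 - p.1).toNat)] else []

lemma flatMap_contrib_succ (s : List Char) : ∀ (st L : Int), 0 ≤ st → st + s.length ≤ L →
    (PySem.List.enumerate s st).flatMap (contrib (L + 1)) =
      ((PySem.List.enumerate s st).flatMap (contrib L)).map (· * 10) := by
  induction s with
  | nil => intro st L _ _; simp [PySem.List.enumerate_nil]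
  | cons c t ih =>
    intro st L h0 hL
    simp only [List.length_cons] at hL
    rw [PySem.List.enumerate_cons, List.flatMap_cons, List.flatMap_cons, List.map_append]
    rw [ih (st + 1) L (by omega) (by omega)]
    congr 1
    unfold contrib
    have he : (L - st).toNat = (L - 1 - st).toNat + 1 := by
      have : st < L := by push_cast at hL; omega
      omega
    split_ifs <;> simp [he, pow_succ, mul_assoc]

lemma flatMap_contrib_eq_goB (s : List Char) :
    (PySem.List.enumerate s 0).flatMap (contrib (s.length : Int)) = goB s.reverse := by
  induction s using List.reverseRecOn with
  | nil => simp [PySem.List.enumerate_nil, goB]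
  | append_singleton t c ih =>
    rw [PySem.List.enumerate_append, List.flatMap_append, List.reverse_append]
    simp only [List.reverse_singleton, List.singleton_append, goB]
    rw [← ih]
    congr 1
    · have : ((t ++ [c]).length : Int) = (t.length : Int) + 1 := by simp
      rw [this, flatMap_contrib_succ t 0 (t.length : Int) le_rfl (by simp)]
    · rw [PySem.List.enumerate_cons, PySem.List.enumerate_nil, List.flatMap_cons, List.flatMap_nil]
      unfold contrib
      simp only [zero_add, List.append_nil]
      split_ifs <;> simp

lemma natCast_floordiv (m : Nat) : PySem.Int.floordiv (m : Int) 10 = ((m / 10 : Nat) : Int) := by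
  rw [show (10 : Int) = ((10 : Nat) : Int) by norm_cast]
  exact PySem.Int.floordiv_natCast m 10

lemma natCast_mod (m : Nat) : PySem.Int.mod (m : Int) 10 = ((m % 10 : Nat) : Int) := by
  rw [show (10 : Int) = ((10 : Nat) : Int) by norm_cast]
  exact PySem.Int.mod_natCast m 10

lemma goB_toDigits (m : Nat) (h : 0 < m) :
    goB (Nat.toDigits 10 m).reverse = Rv (m : Int) 1 := by
  induction m using Nat.strong_induction_on with
  | _ m ih =>
    have hm : (0 : Int) < (m : Int) := by exact_mod_cast h
    rw [Rv_pos _ _ hm, natCast_floordiv, natCast_mod]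
    by_cases h10 : m < 10
    · rw [toDigits_lt m h10, Nat.div_eq_of_lt h10, Nat.mod_eq_of_lt h10]
      rw [Rv_nonpos _ _ (by norm_num)]
      simp only [goB, List.reverse_singleton, List.map_nil, List.nil_append]
      rw [digitVal_digitChar m h10]
      have hne : (m : Int) ≠ 0 := by omega
      rw [if_pos hne, if_pos hne]
      simp
    · have hge : 10 ≤ m := by omega
      have hd : 0 < m / 10 := Nat.div_pos hge (by norm_num)
      have hlt : m / 10 < m := Nat.div_lt_self h (by norm_num)
      rw [toDigits_ge m hge, List.reverse_append, List.reverse_singleton]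
      simp only [List.singleton_append, goB]
      rw [ih (m / 10) hlt hd, digitVal_digitChar (m % 10) (Nat.mod_lt m (by norm_num)),
        ← Rv_scale]
      norm_num

lemma split_alt_flatMap (n : Int) (h : 0 < n) :
    split_alt n = (PySem.List.enumerate (PySem.Int.toChars n) 0).flatMap
      (contrib ((PySem.Int.toChars n).length : Int)) := by
  unfold split_alt
  rw [if_neg (by omega)]
  dsimp only
  have hfun : (fun (ans : List Int) (p : Int × Char) =>
      if (PySem.Int.ofChars? [p.2]).getD 0 ≠ 0 then
        ans ++ [(PySem.Int.ofChars? [p.2]).getD 0 *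
          10 ^ ((((PySem.Int.toChars n).length : Int) - 1 - p.1).toNat)]
      else ans) =
      (fun ans p => ans ++ contrib ((PySem.Int.toChars n).length : Int) p) := by
    funext ans p
    unfold contrib digitVal
    split_ifs <;> simp_all
  rw [hfun, PySem.List.foldl_append_eq_flatMap]
  simp

-- ===== VERDICT (by name: the statement is the Claim_ definition above) =====
theorem split_spec : Claim_equal_split := by
  intro n _
  unfold Spec_split split
  rw [PySem.List.slice?_none_none_neg_one]
  simp only [Option.getD_some]
  by_cases h : 0 < n
  · rw [splitLoop_reverse, split_alt_flatMap n h, flatMap_contrib_eq_goB]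
    have hchars : PySem.Int.toChars n = Nat.toDigits 10 n.toNat := by
      unfold PySem.Int.toChars
      rw [if_neg (by omega)]
    rw [hchars, goB_toDigits n.toNat (by omega), Int.toNat_of_nonneg h.le]
  · rw [splitLoop_nonpos _ _ _ h]
    unfold split_alt
    rw [if_pos (by omega)]
    rfl
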